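-- pv_equiv track=rewrite | github.com/dmwm/DAS | src/python/DAS/core/das_ql_parser.py | relax
-- ===== SOURCE A (Python) =====
-- def relax(query, operators):
--     "Add spaces around special symbols"
--     qlen = len(query)
--     for oper in operators + ['(', ')', '>', '<', '!', '[', ']', ',', '=']:
--         if  oper in ['in', 'between', 'last']:
--             continue
--         query = query.replace(oper, ' %s ' % oper)
--     query = ' '.join(q.strip() for q in query.split())
--     qlen = len(query)
--     idx = 0
--     out = ''
--     while idx < qlen:
--         val = query[idx]
--         nval = query[idx+1] if idx+1 < qlen else None
--         nnval = query[idx+2] if idx+2 < qlen else None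
--         if  nnval and nval and val in ['<', '>', '!'] and nnval == '=':
--             out += '%s%s ' % (val, nnval)
--             idx += 3
--         else:
--             out += val
--             idx += 1
--     out = ' '.join(o.strip() for o in out.split())
--     return out
-- ===== SOURCE B (Python) =====
-- def relax(query, operators):
--     "Add spaces around special symbols"
--     for oper in operators + ['(', ')', '>', '<', '!', '[', ']', ',', '=']:
--         if oper in ('in', 'between', 'last'):
--             continue
--         query = query.replace(oper, ' %s ' % oper)
--     toks = query.split()
--     res = []
--     for t in reversed(toks):
--         if res and res[0] == '=' and t in ('<', '>', '!'):
--             res = [t + '='] + res[1:]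
--         else:
--             res = [t] + res
--     return ' '.join(res)
-- ===== Notes on version B (the rewrite author's own statement) =====
-- stated objective: simpler
-- what changed: The character-indexed while-loop with two-character lookahead that re-glues '<'/'>'/'!' to a following '=' is replaced by a single fold over the whitespace-split token list that merges a '<'/'>'/'!' token with an adjacent '=' token, removing all index arithmetic and the extra split/strip/join normalisation pass.
import Mathlib
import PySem

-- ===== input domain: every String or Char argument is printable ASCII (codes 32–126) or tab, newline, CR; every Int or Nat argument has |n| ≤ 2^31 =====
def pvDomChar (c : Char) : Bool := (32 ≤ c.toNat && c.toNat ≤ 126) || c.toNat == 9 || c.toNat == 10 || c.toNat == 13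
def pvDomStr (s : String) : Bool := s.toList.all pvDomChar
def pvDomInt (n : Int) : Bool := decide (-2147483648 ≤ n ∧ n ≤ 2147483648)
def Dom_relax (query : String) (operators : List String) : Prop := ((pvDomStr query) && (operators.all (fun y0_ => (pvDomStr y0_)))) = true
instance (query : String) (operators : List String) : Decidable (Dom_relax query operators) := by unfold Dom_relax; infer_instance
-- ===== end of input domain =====

-- B replaces A's character-indexed while-loop second pass by a single right-to-left fold over the
-- whitespace-split tokens that glues '<'/'>'/'!' to a following '=' token; same return value, alternative structure.

-- ===== PORT A =====
-- A's while-loop as structural recursion over the remaining characters with the `out` accumulator;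
-- `nval`/`nnval` existence (idx+1 < qlen / idx+2 < qlen) is the match on the lookahead shape
-- (one-character Python strings are always truthy, so `nnval and nval` adds nothing beyond existence).
def relaxGoA : List Char → List Char → List Char
  | [], out => out
  | a :: b :: c :: rest', out =>
    if (a == '<' || a == '>' || a == '!') && c == '=' then
      relaxGoA rest' (out ++ [a, c, ' '])
    else
      relaxGoA (b :: c :: rest') (out ++ [a])
  | a :: rest, out => relaxGoA rest (out ++ [a])
termination_by cs _ => cs.length
decreasing_by all_goals (simp only [List.length_cons]; omega)

def relax (query : String) (operators : List String) : String :=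
  let q1 := (operators ++ ["(", ")", ">", "<", "!", "[", "]", ",", "="]).foldl
    (fun q oper => if oper ∈ ["in", "between", "last"] then q
                   else PySem.Str.replace q oper (" " ++ oper ++ " ")) query
  let q2 := PySem.Str.join " " ((PySem.Str.split₀ q1).map PySem.Str.strip)
  let out := String.ofList (relaxGoA q2.toList [])
  PySem.Str.join " " ((PySem.Str.split₀ out).map PySem.Str.strip)

-- ===== PORT B =====
def relax_alt (query : String) (operators : List String) : String :=
  let q1 := (operators ++ ["(", ")", ">", "<", "!", "[", "]", ",", "="]).foldl
    (fun q oper => if oper ∈ ["in", "between", "last"] then q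
                   else PySem.Str.replace q oper (" " ++ oper ++ " ")) query
  let toks := PySem.Str.split₀ q1
  let res := toks.reverse.foldl
    (fun res t =>
      if res.head? == some "=" && (t == "<" || t == ">" || t == "!") then
        (t ++ "=") :: res.tail
      else t :: res) []
  PySem.Str.join " " res

-- ===== PRECONDITION & SPEC =====
def Spec_relax (query : String) (operators : List String) (out : String) : Prop := out = relax_alt query operators
instance (query : String) (operators : List String) (out : String) : Decidable (Spec_relax query operators out) := by unfold Spec_relax; infer_instance

-- ===== CLAIM (what is proved, stated in full; the proofs are below) =====
def Claim_equal_relax : Prop := ∀ (query : String) (operators : List String), Dom_relax query operators → Spec_relax query operators (relax query operators)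


-- ===== LEMMAS AND PROOFS =====

-- tokens of a whitespace split: nonempty, whitespace-free
def pvTok (t : List Char) : Prop := t ≠ [] ∧ ∀ ch ∈ t, PySem.Chars.isspace ch = false
def pvF1 (ts : List (List Char)) : Prop := ∀ t ∈ ts, pvTok t
-- each token containing one of the four glued symbols is that symbol alone
def pvF2 (ts : List (List Char)) : Prop :=
  ∀ t ∈ ts, ∀ c, (c = '<' ∨ c = '>' ∨ c = '!' ∨ c = '=') → c ∈ t → t = [c]

-- forward (left-to-right) token gluing; pairs (special, '=') never overlap, so it equals B's backward fold
def mergeF : List (List Char) → List (List Char)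
  | [] => []
  | [t] => [t]
  | t1 :: t2 :: rest =>
    if (t1 = ['<'] ∨ t1 = ['>'] ∨ t1 = ['!']) ∧ t2 = ['='] then
      (t1 ++ t2) :: mergeF rest
    else t1 :: mergeF (t2 :: rest)

-- every occurrence of c is flanked by ' ' (or the string boundary); p = previous char (' ' at the start)
def pvIsoAux (c : Char) : Char → List Char → Bool
  | _, [] => true
  | p, x :: xs =>
    (!(x == c) || ((p == ' ') && (xs.head? == none || xs.head? == some ' '))) && pvIsoAux c x xs

-- equation lemmas for the pattern-matched definitions
theorem pvIsoAux_cons (c p x : Char) (xs : List Char) :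
    pvIsoAux c p (x :: xs)
      = ((!(x == c) || ((p == ' ') && (xs.head? == none || xs.head? == some ' ')))
          && pvIsoAux c x xs) := rfl

theorem mergeF_nil : mergeF [] = [] := rfl
theorem mergeF_one (t : List Char) : mergeF [t] = [t] := rfl
theorem mergeF_cons₂ (t1 t2 : List Char) (rest : List (List Char)) :
    mergeF (t1 :: t2 :: rest)
      = if (t1 = ['<'] ∨ t1 = ['>'] ∨ t1 = ['!']) ∧ t2 = ['='] then
          (t1 ++ t2) :: mergeF rest
        else t1 :: mergeF (t2 :: rest) := rfl

theorem relaxGoA_nil (out : List Char) : relaxGoA [] out = out := by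
  simp [relaxGoA]
theorem relaxGoA_one (a : Char) (out : List Char) : relaxGoA [a] out = out ++ [a] := by
  simp [relaxGoA]
theorem relaxGoA_two (a b : Char) (out : List Char) : relaxGoA [a, b] out = out ++ [a, b] := by
  simp [relaxGoA, List.append_assoc]
theorem relaxGoA_main (a b c : Char) (rest out : List Char) :
    relaxGoA (a :: b :: c :: rest) out
      = if ((a == '<' || a == '>' || a == '!') && c == '=') = true then
          relaxGoA rest (out ++ [a, c, ' '])
        else relaxGoA (b :: c :: rest) (out ++ [a]) := by
  simp only [relaxGoA]

theorem pv_split0_go_nil (cur : List Char) (acc : List (List Char)) :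
    PySem.Chars.split₀.go [] cur acc
      = if cur.isEmpty then acc.reverse else (cur.reverse :: acc).reverse := rfl
theorem pv_split0_go_cons (x : Char) (rest cur : List Char) (acc : List (List Char)) :
    PySem.Chars.split₀.go (x :: rest) cur acc
      = if PySem.Chars.isspace x then
          (if cur.isEmpty then PySem.Chars.split₀.go rest [] acc
           else PySem.Chars.split₀.go rest [] (cur.reverse :: acc))
        else PySem.Chars.split₀.go rest (x :: cur) acc := rfl

theorem pv_replace_go_zero (old new l acc : List Char) :
    PySem.Chars.replace.go old new 0 l acc = acc.reverse ++ l := rfl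
theorem pv_replace_go_succ_nil (old new : List Char) (fuel : Nat) (acc : List Char) :
    PySem.Chars.replace.go old new (fuel + 1) [] acc = acc.reverse := rfl
theorem pv_replace_go_succ_cons (old new : List Char) (fuel : Nat) (c : Char) (t acc : List Char) :
    PySem.Chars.replace.go old new (fuel + 1) (c :: t) acc
      = if old.isPrefixOf (c :: t) then
          PySem.Chars.replace.go old new fuel (List.drop old.length (c :: t)) (new.reverse ++ acc)
        else PySem.Chars.replace.go old new fuel t (c :: acc) := rfl

-- `replace` with a single-character pattern is a flatMap over the characters
theorem pv_replace_go_single (d : Char) (new : List Char) :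
    ∀ (fuel : Nat) (l acc : List Char), l.length ≤ fuel →
      PySem.Chars.replace.go [d] new fuel l acc
        = acc.reverse ++ l.flatMap (fun x => if x = d then new else [x]) := by
  intro fuel
  induction fuel with
  | zero =>
    intro l acc h
    have hl : l = [] := List.eq_nil_of_length_eq_zero (Nat.le_zero.mp h)
    subst hl; simp [pv_replace_go_zero]
  | succ fuel ih =>
    intro l acc h
    cases l with
    | nil => simp [pv_replace_go_succ_nil]
    | cons c t =>
      rw [pv_replace_go_succ_cons]
      by_cases hd : d = c
      · subst hd
        rw [if_pos (by simp [List.isPrefixOf])]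
        rw [ih _ _ (by simpa using Nat.le_of_succ_le_succ h)]
        simp
      · rw [if_neg (by simp [List.isPrefixOf, hd])]
        rw [ih _ _ (Nat.le_of_succ_le_succ h)]
        simp [Ne.symm hd]

theorem pv_replace_single (s : List Char) (d : Char) (new : List Char) :
    PySem.Chars.replace s [d] new = s.flatMap (fun x => if x = d then new else [x]) := by
  rw [PySem.Chars.replace]
  simp only [List.isEmpty_cons, Bool.false_eq_true, if_false]
  exact pv_replace_go_single d new s.length s [] le_rfl

theorem pv_iso_establish (c : Char) (hc : c ≠ ' ') :
    ∀ (l : List Char) (p : Char),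
      pvIsoAux c p (l.flatMap (fun x => if x = c then [' ', c, ' '] else [x])) = true := by
  intro l
  induction l with
  | nil => intro p; rfl
  | cons x xs ih =>
    intro p
    by_cases hx : x = c
    · subst hx
      rw [List.flatMap_cons, if_pos rfl, List.cons_append, List.cons_append, List.cons_append,
          List.nil_append]
      rw [pvIsoAux_cons, pvIsoAux_cons, pvIsoAux_cons]
      have h1 : (' ' == x) = false := by simp [Ne.symm hc]
      simp [h1, ih]
    · rw [List.flatMap_cons, if_neg hx, List.cons_append, List.nil_append]
      rw [pvIsoAux_cons]
      simp [hx, ih]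

theorem pv_iso_preserve (c d : Char) (hcd : c ≠ d) (hc : c ≠ ' ') (hd : d ≠ ' ') :
    ∀ (l : List Char) (p p' : Char), (p = ' ' → p' = ' ') →
      pvIsoAux c p l = true →
      pvIsoAux c p' (l.flatMap (fun x => if x = d then [' ', d, ' '] else [x])) = true := by
  intro l
  induction l with
  | nil => intro p p' _ _; rfl
  | cons x xs ih =>
    intro p p' hp h
    rw [pvIsoAux_cons, Bool.and_eq_true] at h
    obtain ⟨h1, h2⟩ := h
    by_cases hxd : x = d
    · subst hxd
      rw [List.flatMap_cons, if_pos rfl, List.cons_append, List.cons_append, List.cons_append,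
          List.nil_append]
      rw [pvIsoAux_cons, Bool.and_eq_true]
      refine ⟨by simp [Ne.symm hc], ?_⟩
      rw [pvIsoAux_cons, Bool.and_eq_true]
      refine ⟨by simp, ?_⟩
      rw [pvIsoAux_cons, Bool.and_eq_true]
      refine ⟨by simp [Ne.symm hc], ?_⟩
      exact ih x ' ' (fun _ => rfl) h2
    · by_cases hxc : x = c
      · subst hxc
        simp only [beq_self_eq_true, Bool.not_true, Bool.false_or, Bool.or_eq_true,
          Bool.and_eq_true, beq_iff_eq] at h1
        obtain ⟨hps, hnext⟩ := h1
        rw [List.flatMap_cons, if_neg hxd, List.cons_append, List.nil_append]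
        rw [pvIsoAux_cons, Bool.and_eq_true]
        constructor
        · have hp' : p' = ' ' := hp hps
          subst hp'
          simp only [beq_self_eq_true, Bool.not_true, Bool.false_or, Bool.or_eq_true,
            Bool.and_eq_true, beq_iff_eq, true_and]
          cases xs with
          | nil => left; simp
          | cons y ys =>
            right
            simp only [List.head?_cons, Option.some.injEq] at hnext
            have hy : y = ' ' := by
              rcases hnext with h' | h'
              · exact absurd h' (by simp)
              · exact h'
            subst hy
            rw [List.flatMap_cons, if_neg (Ne.symm hd)]
            simp
        · exact ih x x (fun hx' => absurd hx' hc) h2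
      · rw [List.flatMap_cons, if_neg hxd, List.cons_append, List.nil_append]
        rw [pvIsoAux_cons, Bool.and_eq_true]
        refine ⟨by simp [hxc], ?_⟩
        exact ih x x (fun hx' => hx') h2

theorem pv_isspace_space : PySem.Chars.isspace ' ' = true := by decide

theorem pv_iso_split0_go (c : Char) :
    ∀ (l : List Char) (p : Char) (cur : List Char) (acc : List (List Char)),
      pvIsoAux c p l = true →
      (cur = [] ∨ (PySem.Chars.isspace p = false ∧ cur.head? = some p)) →
      (c ∈ cur → cur = [c] ∧ (l.head? = none ∨ l.head? = some ' ')) →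
      (∀ u ∈ acc, c ∈ u → u = [c]) →
      ∀ u ∈ PySem.Chars.split₀.go l cur acc, c ∈ u → u = [c] := by
  intro l
  induction l with
  | nil =>
    intro p cur acc _ _ hcur hacc u hu hcu
    rw [pv_split0_go_nil] at hu
    by_cases hce : cur.isEmpty
    · rw [if_pos hce] at hu
      exact hacc u (by simpa using hu) hcu
    · rw [if_neg hce] at hu
      simp only [List.reverse_cons, List.mem_append, List.mem_reverse, List.mem_cons] at hu
      rcases hu with hu | hu | hu
      · exact hacc u hu hcu
      · subst hu
        have := hcur (by simpa using hcu)
        rw [this.1]; rfl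
      · simp at hu
  | cons x xs ih =>
    intro p cur acc h hlink hcur hacc u hu hcu
    rw [pvIsoAux_cons, Bool.and_eq_true] at h
    obtain ⟨h1, h2⟩ := h
    rw [pv_split0_go_cons] at hu
    by_cases hsp : PySem.Chars.isspace x = true
    · rw [if_pos hsp] at hu
      by_cases hce : cur.isEmpty
      · rw [if_pos hce] at hu
        exact ih x [] acc h2 (Or.inl rfl) (by simp) hacc u hu hcu
      · rw [if_neg hce] at hu
        refine ih x [] (cur.reverse :: acc) h2 (Or.inl rfl) (by simp) ?_ u hu hcu
        intro v hv hcv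
        rcases List.mem_cons.mp hv with hv | hv
        · subst hv
          have := hcur (by simpa using hcv)
          rw [this.1]; rfl
        · exact hacc v hv hcv
    · rw [if_neg hsp] at hu
      have hspf : PySem.Chars.isspace x = false := by
        cases hx : PySem.Chars.isspace x
        · rfl
        · exact absurd hx hsp
      refine ih x (x :: cur) acc h2 (Or.inr ⟨hspf, rfl⟩) ?_ hacc u hu hcu
      intro hcx
      rcases List.mem_cons.mp hcx with hcx | hcx
      · -- the new char is c itself: previous is ' ', so cur is empty, and the next char is a space
        subst hcx
        simp only [beq_self_eq_true, Bool.not_true, Bool.false_or, Bool.or_eq_true,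
          Bool.and_eq_true, beq_iff_eq] at h1
        obtain ⟨hps, hnext⟩ := h1
        have hcurnil : cur = [] := by
          rcases hlink with h' | ⟨h', _⟩
          · exact h'
          · subst hps; rw [pv_isspace_space] at h'; exact absurd h' (by simp)
        subst hcurnil
        refine ⟨rfl, ?_⟩
        simpa using hnext
      · -- c already inside cur: then the current char would have to be a space
        exfalso
        have hx' := hcur hcx
        rcases hx'.2 with h' | h'
        · simp at h'
        · simp only [List.head?_cons, Option.some.injEq] at h'
          rw [h'] at hspf
          rw [pv_isspace_space] at hspf
          exact absurd hspf (by simp)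

theorem pv_iso_split0 (c : Char) (l : List Char) (h : pvIsoAux c ' ' l = true) :
    ∀ u ∈ PySem.Chars.split₀ l, c ∈ u → u = [c] := by
  rw [PySem.Chars.split₀]
  exact pv_iso_split0_go c l ' ' [] [] h (Or.inl rfl) (by simp) (by simp)

-- structural lemmas for split₀
theorem pv_split0_go_acc :
    ∀ (l cur : List Char) (acc : List (List Char)),
      PySem.Chars.split₀.go l cur acc = acc.reverse ++ PySem.Chars.split₀.go l cur [] := by
  intro l
  induction l with
  | nil =>
    intro cur acc
    by_cases hce : cur.isEmpty
    · rw [pv_split0_go_nil, if_pos hce, pv_split0_go_nil, if_pos hce]; simp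
    · rw [pv_split0_go_nil, if_neg hce, pv_split0_go_nil, if_neg hce]; simp
  | cons x xs ih =>
    intro cur acc
    by_cases hsp : PySem.Chars.isspace x = true
    · by_cases hce : cur.isEmpty
      · rw [pv_split0_go_cons, if_pos hsp, if_pos hce,
           pv_split0_go_cons, if_pos hsp, if_pos hce]
        exact ih [] acc
      · rw [pv_split0_go_cons, if_pos hsp, if_neg hce,
           pv_split0_go_cons, if_pos hsp, if_neg hce]
        rw [ih [] (cur.reverse :: acc), ih [] [cur.reverse]]
        simp
    · rw [pv_split0_go_cons, if_neg hsp, pv_split0_go_cons, if_neg hsp]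
      exact ih (x :: cur) acc

theorem pv_split0_go_chunk :
    ∀ (t : List Char), (∀ ch ∈ t, PySem.Chars.isspace ch = false) →
      ∀ (l cur : List Char) (acc : List (List Char)),
        PySem.Chars.split₀.go (t ++ l) cur acc = PySem.Chars.split₀.go l (t.reverse ++ cur) acc := by
  intro t
  induction t with
  | nil => intro _ l cur acc; simp
  | cons x t' ih =>
    intro ht l cur acc
    have hx : PySem.Chars.isspace x = false := ht x (List.mem_cons_self ..)
    rw [List.cons_append, pv_split0_go_cons, if_neg (by simp [hx])]
    rw [ih (fun ch hch => ht ch (List.mem_cons_of_mem _ hch)) l (x :: cur) acc]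
    simp

theorem pv_split0_token (t : List Char) (ht : pvTok t) : PySem.Chars.split₀ t = [t] := by
  have h := pv_split0_go_chunk t ht.2 [] [] []
  rw [List.append_nil] at h
  rw [PySem.Chars.split₀, h, pv_split0_go_nil]
  rw [if_neg (by simp [List.isEmpty_iff, ht.1])]
  simp

theorem pv_split0_space (x : Char) (cs : List Char) (hx : PySem.Chars.isspace x = true) :
    PySem.Chars.split₀ (x :: cs) = PySem.Chars.split₀ cs := by
  rw [PySem.Chars.split₀, pv_split0_go_cons, if_pos hx]
  simp [PySem.Chars.split₀]

theorem pv_split0_token_space (t : List Char) (ht : pvTok t) (cs : List Char) :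
    PySem.Chars.split₀ (t ++ ' ' :: cs) = t :: PySem.Chars.split₀ cs := by
  rw [PySem.Chars.split₀, pv_split0_go_chunk t ht.2]
  rw [pv_split0_go_cons, if_pos pv_isspace_space]
  rw [if_neg (by simp [List.isEmpty_iff, ht.1])]
  rw [pv_split0_go_acc]
  simp [PySem.Chars.split₀]

theorem pv_split0_F1_go :
    ∀ (l cur : List Char) (acc : List (List Char)),
      (∀ ch ∈ cur, PySem.Chars.isspace ch = false) →
      (∀ u ∈ acc, pvTok u) →
      ∀ u ∈ PySem.Chars.split₀.go l cur acc, pvTok u := by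
  intro l
  induction l with
  | nil =>
    intro cur acc hcur hacc u hu
    rw [pv_split0_go_nil] at hu
    by_cases hce : cur.isEmpty
    · rw [if_pos hce] at hu
      exact hacc u (by simpa using hu)
    · rw [if_neg hce] at hu
      simp only [List.reverse_cons, List.mem_append, List.mem_reverse, List.mem_cons] at hu
      rcases hu with hu | hu | hu
      · exact hacc u hu
      · subst hu
        refine ⟨by simpa [List.isEmpty_iff] using hce, fun ch hch => hcur ch (by simpa using hch)⟩
      · simp at hu
  | cons x xs ih =>
    intro cur acc hcur hacc u hu
    rw [pv_split0_go_cons] at hu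
    by_cases hsp : PySem.Chars.isspace x = true
    · rw [if_pos hsp] at hu
      by_cases hce : cur.isEmpty
      · rw [if_pos hce] at hu
        exact ih [] acc (by simp) hacc u hu
      · rw [if_neg hce] at hu
        refine ih [] (cur.reverse :: acc) (by simp) ?_ u hu
        intro v hv
        rcases List.mem_cons.mp hv with hv | hv
        · subst hv
          exact ⟨by simpa [List.isEmpty_iff] using hce, fun ch hch => hcur ch (by simpa using hch)⟩
        · exact hacc v hv
    · rw [if_neg hsp] at hu
      have hspf : PySem.Chars.isspace x = false := by
        cases hx : PySem.Chars.isspace x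
        · rfl
        · exact absurd hx hsp
      refine ih (x :: cur) acc ?_ hacc u hu
      intro ch hch
      rcases List.mem_cons.mp hch with hch | hch
      · subst hch; exact hspf
      · exact hcur ch hch

theorem pv_split0_F1 (l : List Char) : pvF1 (PySem.Chars.split₀ l) := by
  intro u hu
  rw [PySem.Chars.split₀] at hu
  exact pv_split0_F1_go l [] [] (by simp) (by simp) u hu

theorem pv_dropWhile_id (l : List Char) (h : ∀ ch ∈ l, PySem.Chars.isspace ch = false) :
    l.dropWhile PySem.Chars.isspace = l := by
  cases l with
  | nil => rfl
  | cons x xs =>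
    rw [List.dropWhile_cons_of_neg]
    simp [h x (List.mem_cons_self ..)]

theorem pv_strip_tok (t : List Char) (ht : ∀ ch ∈ t, PySem.Chars.isspace ch = false) :
    PySem.Chars.strip t = t := by
  rw [PySem.Chars.strip, PySem.Chars.lstrip, PySem.Chars.rstrip]
  rw [pv_dropWhile_id t ht]
  rw [pv_dropWhile_id t.reverse (fun ch hch => ht ch (List.mem_reverse.mp hch))]
  exact List.reverse_reverse t

-- ===== the A-side scan =====
theorem pv_goA_out : ∀ (n : Nat) (cs : List Char), cs.length ≤ n →
    ∀ (out : List Char), relaxGoA cs out = out ++ relaxGoA cs [] := by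
  intro n
  induction n with
  | zero =>
    intro cs h out
    have : cs = [] := List.eq_nil_of_length_eq_zero (Nat.le_zero.mp h)
    subst this; simp [relaxGoA_nil]
  | succ n ih =>
    intro cs h out
    rcases cs with _ | ⟨a, _ | ⟨b, _ | ⟨c, rest⟩⟩⟩
    · simp [relaxGoA_nil]
    · simp [relaxGoA_one]
    · simp [relaxGoA_two]
    · rw [relaxGoA_main, relaxGoA_main]
      by_cases hcond : ((a == '<' || a == '>' || a == '!') && c == '=') = true
      · rw [if_pos hcond, if_pos hcond]
        rw [ih rest (by simp at h ⊢; omega) (out ++ [a, c, ' ']),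
            ih rest (by simp at h ⊢; omega) ([] ++ [a, c, ' '])]
        simp
      · rw [if_neg hcond, if_neg hcond]
        rw [ih (b :: c :: rest) (by simp at h ⊢; omega) (out ++ [a]),
            ih (b :: c :: rest) (by simp at h ⊢; omega) ([] ++ [a])]
        simp

theorem pv_goA_acc (cs out : List Char) : relaxGoA cs out = out ++ relaxGoA cs [] :=
  pv_goA_out cs.length cs le_rfl out

theorem pv_goA_pass (a : Char) (ha : ¬(a = '<' ∨ a = '>' ∨ a = '!')) (cs : List Char) :
    relaxGoA (a :: cs) [] = a :: relaxGoA cs [] := by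
  have hb : (a == '<' || a == '>' || a == '!') = false := by
    simp only [Bool.or_eq_false_iff, beq_eq_false_iff_ne, ne_eq]
    exact ⟨⟨fun h => ha (Or.inl h), fun h => ha (Or.inr (Or.inl h))⟩,
      fun h => ha (Or.inr (Or.inr h))⟩
  rcases cs with _ | ⟨b, _ | ⟨c, rest⟩⟩
  · simp [relaxGoA_one, relaxGoA_nil]
  · rw [relaxGoA_two, relaxGoA_one]; rfl
  · rw [relaxGoA_main, if_neg (by simp [hb])]
    rw [pv_goA_acc]; simp

theorem pv_goA_pass2 (a b c : Char) (hc : c ≠ '=') (cs : List Char) :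
    relaxGoA (a :: b :: c :: cs) [] = a :: relaxGoA (b :: c :: cs) [] := by
  rw [relaxGoA_main, if_neg (by simp [hc])]
  rw [pv_goA_acc]; simp

theorem pv_goA_hit (a : Char) (ha : a = '<' ∨ a = '>' ∨ a = '!') (cs : List Char) :
    relaxGoA (a :: ' ' :: '=' :: cs) [] = a :: '=' :: ' ' :: relaxGoA cs [] := by
  rw [relaxGoA_main, if_pos (by rcases ha with h | h | h <;> subst h <;> rfl)]
  rw [pv_goA_acc]; simp

theorem pv_goA_chunk (t : List Char) (ht : ∀ ch ∈ t, ¬(ch = '<' ∨ ch = '>' ∨ ch = '!')) :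
    ∀ (cs : List Char), relaxGoA (t ++ cs) [] = t ++ relaxGoA cs [] := by
  induction t with
  | nil => intro cs; simp
  | cons x t' ih =>
    intro cs
    rw [List.cons_append, pv_goA_pass x (ht x (List.mem_cons_self ..)) (t' ++ cs)]
    rw [ih (fun ch hch => ht ch (List.mem_cons_of_mem _ hch)) cs]
    rfl

-- a token other than '<' / '>' / '!' contains none of those characters (from pvF2)
theorem pv_safe_token (ts : List (List Char)) (h2 : pvF2 ts) (t : List Char) (ht : t ∈ ts)
    (hne : ¬(t = ['<'] ∨ t = ['>'] ∨ t = ['!'])) :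
    ∀ ch ∈ t, ¬(ch = '<' ∨ ch = '>' ∨ ch = '!') := by
  intro ch hch hsp
  rcases hsp with h | h | h <;> subst h <;>
    exact hne (by
      have := h2 t ht _ (by simp) hch
      simp [this])

-- the head character of a token other than ['='] is not '='
theorem pv_head_ne_eq (ts : List (List Char)) (h2 : pvF2 ts) (t : List Char) (ht : t ∈ ts)
    (hne : t ≠ ['=']) (x : Char) (xs : List Char) (hx : t = x :: xs) : x ≠ '=' := by
  intro hx'
  subst hx'
  exact hne (h2 t ht '=' (by simp) (by rw [hx]; exact List.mem_cons_self ..))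

-- main A-side lemma: the scan over the space-join of the tokens splits back into the glued tokens
theorem pv_splitA : ∀ (n : Nat) (ts : List (List Char)), ts.length ≤ n → pvF1 ts → pvF2 ts →
    PySem.Chars.split₀ (relaxGoA (PySem.Chars.join [' '] ts) []) = mergeF ts := by
  intro n
  induction n with
  | zero =>
    intro ts h _ _
    have : ts = [] := List.eq_nil_of_length_eq_zero (Nat.le_zero.mp h)
    subst this
    rw [PySem.Chars.join_nil, relaxGoA_nil, mergeF_nil]
    rfl
  | succ n ih =>
    intro ts h h1 h2
    rcases ts with _ | ⟨t1, _ | ⟨t2, rest⟩⟩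
    · rw [PySem.Chars.join_nil, relaxGoA_nil, mergeF_nil]
      rfl
    · rw [PySem.Chars.join_singleton, mergeF_one]
      have htok := h1 t1 (List.mem_cons_self ..)
      by_cases hsp : t1 = ['<'] ∨ t1 = ['>'] ∨ t1 = ['!']
      · have : relaxGoA t1 [] = t1 := by
          rcases hsp with h' | h' | h' <;> subst h' <;> rw [relaxGoA_one] <;> rfl
        rw [this, pv_split0_token t1 htok]
      · have h' := pv_goA_chunk t1 (pv_safe_token [t1] h2 t1 (List.mem_cons_self ..) hsp) []
        rw [relaxGoA_nil, List.append_nil] at h'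
        rw [h', pv_split0_token t1 htok]
    · have htok1 := h1 t1 (List.mem_cons_self ..)
      have htok2 := h1 t2 (List.mem_cons_of_mem _ (List.mem_cons_self ..))
      have h1' : pvF1 (t2 :: rest) := fun u hu => h1 u (List.mem_cons_of_mem _ hu)
      have h2' : pvF2 (t2 :: rest) := fun u hu => h2 u (List.mem_cons_of_mem _ hu)
      have h1'' : pvF1 rest := fun u hu => h1' u (List.mem_cons_of_mem _ hu)
      have h2'' : pvF2 rest := fun u hu => h2' u (List.mem_cons_of_mem _ hu)
      rw [PySem.Chars.join_cons_cons]
      by_cases hm : (t1 = ['<'] ∨ t1 = ['>'] ∨ t1 = ['!']) ∧ t2 = ['=']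
      · obtain ⟨hm1, hm2⟩ := hm
        obtain ⟨c, hct, hcs⟩ : ∃ c, t1 = [c] ∧ (c = '<' ∨ c = '>' ∨ c = '!') := by
          rcases hm1 with h' | h' | h'
          · exact ⟨'<', h', Or.inl rfl⟩
          · exact ⟨'>', h', Or.inr (Or.inl rfl)⟩
          · exact ⟨'!', h', Or.inr (Or.inr rfl)⟩
        subst hm2
        subst hct
        have htokm : pvTok [c, '='] := by
          refine ⟨by simp, ?_⟩
          intro ch hch
          rcases List.mem_cons.mp hch with h' | h'
          · rw [h']; exact htok1.2 c (by simp)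
          · have : ch = '=' := by simpa using h'
            rw [this]; decide
        have hmerge : mergeF ([c] :: ['='] :: rest) = ([c] ++ ['=']) :: mergeF rest := by
          rw [mergeF_cons₂, if_pos ⟨hm1, rfl⟩]
        cases rest with
        | nil =>
          rw [PySem.Chars.join_singleton]
          rw [show [c] ++ [' '] ++ ['='] = c :: ' ' :: '=' :: [] from rfl]
          rw [pv_goA_hit c hcs []]
          rw [relaxGoA_nil]
          rw [show (c :: '=' :: ' ' :: [] : List Char) = [c, '='] ++ ' ' :: [] from rfl]
          rw [pv_split0_token_space [c, '='] htokm []]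
          rw [hmerge]
          rfl
        | cons r0 rest' =>
          rw [PySem.Chars.join_cons_cons]
          rw [show [c] ++ [' '] ++ (['='] ++ [' '] ++ PySem.Chars.join [' '] (r0 :: rest'))
              = c :: ' ' :: '=' :: (' ' :: PySem.Chars.join [' '] (r0 :: rest')) from by simp]
          rw [pv_goA_hit c hcs _]
          rw [pv_goA_pass ' ' (by simp) _]
          rw [show (c :: '=' :: ' ' :: ' ' :: relaxGoA (PySem.Chars.join [' '] (r0 :: rest')) [])
              = [c, '='] ++ ' ' :: (' ' :: relaxGoA (PySem.Chars.join [' '] (r0 :: rest')) []) from rfl]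
          rw [pv_split0_token_space [c, '='] htokm _]
          rw [pv_split0_space ' ' _ pv_isspace_space]
          rw [ih (r0 :: rest') (by simp at h ⊢; omega) h1'' h2'']
          rw [hmerge]
          rfl
      · -- no merge at the head
        have hmerge : mergeF (t1 :: t2 :: rest) = t1 :: mergeF (t2 :: rest) := by
          rw [mergeF_cons₂, if_neg hm]
        have hgoal : relaxGoA (t1 ++ [' '] ++ PySem.Chars.join [' '] (t2 :: rest)) []
            = t1 ++ ' ' :: relaxGoA (PySem.Chars.join [' '] (t2 :: rest)) [] := by
          by_cases hs1 : t1 = ['<'] ∨ t1 = ['>'] ∨ t1 = ['!']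
          · have ht2 : t2 ≠ ['='] := fun h' => hm ⟨hs1, h'⟩
            obtain ⟨c, hct, hcs⟩ : ∃ c, t1 = [c] ∧ (c = '<' ∨ c = '>' ∨ c = '!') := by
              rcases hs1 with h' | h' | h'
              · exact ⟨'<', h', Or.inl rfl⟩
              · exact ⟨'>', h', Or.inr (Or.inl rfl)⟩
              · exact ⟨'!', h', Or.inr (Or.inr rfl)⟩
            obtain ⟨x, xs, hx⟩ : ∃ x xs, t2 = x :: xs := by
              cases ht2v : t2 with
              | nil => rw [ht2v] at htok2; exact absurd rfl htok2.1
              | cons x xs => exact ⟨x, xs, rfl⟩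
            have hxne : x ≠ '=' :=
              pv_head_ne_eq (t1 :: t2 :: rest) h2 t2
                (List.mem_cons_of_mem _ (List.mem_cons_self ..)) ht2 x xs hx
            obtain ⟨l2, hl2⟩ : ∃ l2, PySem.Chars.join [' '] (t2 :: rest) = x :: l2 := by
              cases rest with
              | nil => exact ⟨xs, by rw [PySem.Chars.join_singleton, hx]⟩
              | cons r0 rest' =>
                refine ⟨xs ++ [' '] ++ PySem.Chars.join [' '] (r0 :: rest'), ?_⟩
                rw [PySem.Chars.join_cons_cons, hx]; simp
            rw [hl2, hct]
            rw [show [c] ++ [' '] ++ (x :: l2) = c :: ' ' :: x :: l2 from rfl]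
            rw [pv_goA_pass2 c ' ' x hxne l2]
            rw [pv_goA_pass ' ' (by simp) (x :: l2)]
            rfl
          · rw [show t1 ++ [' '] ++ PySem.Chars.join [' '] (t2 :: rest)
                = t1 ++ (' ' :: PySem.Chars.join [' '] (t2 :: rest)) from by simp]
            rw [pv_goA_chunk t1 (pv_safe_token (t1 :: t2 :: rest) h2 t1 (List.mem_cons_self ..) hs1)]
            rw [pv_goA_pass ' ' (by simp)]
        rw [hgoal]
        rw [pv_split0_token_space t1 htok1 _]
        rw [ih (t2 :: rest) (by simp at h ⊢; omega) h1' h2']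
        rw [hmerge]

theorem pv_mergeF_F1 : ∀ (n : Nat) (ts : List (List Char)), ts.length ≤ n → pvF1 ts →
    pvF1 (mergeF ts) := by
  intro n
  induction n with
  | zero =>
    intro ts h _
    have : ts = [] := List.eq_nil_of_length_eq_zero (Nat.le_zero.mp h)
    subst this; intro u hu; rw [mergeF_nil] at hu; simp at hu
  | succ n ih =>
    intro ts h h1
    rcases ts with _ | ⟨t1, _ | ⟨t2, rest⟩⟩
    · intro u hu; rw [mergeF_nil] at hu; simp at hu
    · intro u hu
      rw [mergeF_one] at hu
      have hu' : u = t1 := by simpa using hu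
      rw [hu']
      exact h1 t1 (List.mem_cons_self ..)
    · have htok1 := h1 t1 (List.mem_cons_self ..)
      have htok2 := h1 t2 (List.mem_cons_of_mem _ (List.mem_cons_self ..))
      have h1' : pvF1 (t2 :: rest) := fun u hu => h1 u (List.mem_cons_of_mem _ hu)
      have h1'' : pvF1 rest := fun u hu => h1' u (List.mem_cons_of_mem _ hu)
      rw [mergeF_cons₂]
      by_cases hm : (t1 = ['<'] ∨ t1 = ['>'] ∨ t1 = ['!']) ∧ t2 = ['=']
      · rw [if_pos hm]
        intro u hu
        rcases List.mem_cons.mp hu with hu | hu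
        · subst hu
          refine ⟨by simp [htok1.1], ?_⟩
          intro ch hch
          rcases List.mem_append.mp hch with h' | h'
          · exact htok1.2 ch h'
          · exact htok2.2 ch h'
        · exact ih rest (by simp at h ⊢; omega) h1'' u hu
      · rw [if_neg hm]
        intro u hu
        rcases List.mem_cons.mp hu with hu | hu
        · subst hu; exact htok1
        · exact ih (t2 :: rest) (by simp at h ⊢; omega) h1' u hu

theorem pv_mergeF_head (ts : List (List Char)) (h1 : pvF1 ts) :
    ((mergeF ts).head? = some ['=']) ↔ (ts.head? = some ['=']) := by
  rcases ts with _ | ⟨t1, _ | ⟨t2, rest⟩⟩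
  · rw [mergeF_nil]
  · rw [mergeF_one]
  · rw [mergeF_cons₂]
    by_cases hm : (t1 = ['<'] ∨ t1 = ['>'] ∨ t1 = ['!']) ∧ t2 = ['=']
    · rw [if_pos hm]
      simp only [List.head?_cons, Option.some.injEq]
      constructor
      · intro h'
        exfalso
        rcases hm.1 with h'' | h'' | h'' <;> rw [h''] at h' <;> rw [hm.2] at h' <;> simp at h'
      · intro h'
        exfalso
        rcases hm.1 with h'' | h'' | h'' <;> rw [h''] at h' <;> simp at h'
    · rw [if_neg hm]
      simp

theorem pv_mergeF_eq_cons (ts : List (List Char)) :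
    mergeF (['='] :: ts) = ['='] :: mergeF ts := by
  rcases ts with _ | ⟨t, rest⟩
  · rw [mergeF_one, mergeF_nil]
  · rw [mergeF_cons₂, if_neg (by simp)]

-- ===== the B-side fold =====
theorem pv_foldB_r : ∀ (ss : List String), pvF1 (ss.map String.toList) →
    pvF2 (ss.map String.toList) →
    (ss.foldr
      (fun t res =>
        if res.head? == some "=" && (t == "<" || t == ">" || t == "!") then
          (t ++ "=") :: res.tail
        else t :: res) []).map String.toList = mergeF (ss.map String.toList) := by
  intro ss
  induction ss with
  | nil => intro _ _; rfl
  | cons s ss ihs =>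
    intro h1 h2
    have h1' : pvF1 (ss.map String.toList) := fun u hu => h1 u (by simp at hu ⊢; tauto)
    have h2' : pvF2 (ss.map String.toList) := fun u hu => h2 u (by simp at hu ⊢; tauto)
    have IH := ihs h1' h2'
    rw [List.foldr_cons]
    set R := ss.foldr
      (fun t res =>
        if res.head? == some "=" && (t == "<" || t == ">" || t == "!") then
          (t ++ "=") :: res.tail
        else t :: res) [] with hR
    by_cases hcond : (R.head? == some "=" && (s == "<" || s == ">" || s == "!")) = true
    · rw [if_pos hcond]
      simp only [Bool.and_eq_true, Bool.or_eq_true, beq_iff_eq] at hcond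
      obtain ⟨hRh, hs⟩ := hcond
      have hmh : (mergeF (ss.map String.toList)).head? = some ['='] := by
        rw [← IH, List.head?_map, hRh]
        rfl
      have hsh : (ss.map String.toList).head? = some ['='] := by
        rw [← pv_mergeF_head _ h1']
        exact hmh
      obtain ⟨s0, ss', hss⟩ : ∃ s0 ss', ss = s0 :: ss' := by
        cases ss with
        | nil => simp at hsh
        | cons s0 ss' => exact ⟨s0, ss', rfl⟩
      subst hss
      have hs0 : s0.toList = ['='] := by simpa using hsh
      have hspec : s.toList = ['<'] ∨ s.toList = ['>'] ∨ s.toList = ['!'] := by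
        rcases hs with (h' | h') | h' <;> subst h' <;> simp
      have hRm : R.map String.toList = ['='] :: mergeF (ss'.map String.toList) := by
        rw [IH]; rw [List.map_cons, hs0, pv_mergeF_eq_cons]
      have htail : R.tail.map String.toList = mergeF (ss'.map String.toList) := by
        have h' := congrArg List.tail hRm
        simpa [← List.map_tail] using h'
      rw [List.map_cons, htail]
      rw [show ((s :: s0 :: ss').map String.toList) = s.toList :: ['='] :: ss'.map String.toList
          from by rw [List.map_cons, List.map_cons, hs0]]
      rw [show mergeF (s.toList :: ['='] :: ss'.map String.toList)
          = (s.toList ++ ['=']) :: mergeF (ss'.map String.toList) from by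
        rw [mergeF_cons₂, if_pos ⟨hspec, rfl⟩]]
      congr 1
      rw [String.toList_append]
      congr 1
    · rw [if_neg hcond]
      rw [List.map_cons, List.map_cons]
      have hstep : mergeF (s.toList :: ss.map String.toList)
          = s.toList :: mergeF (ss.map String.toList) := by
        cases hmap : ss.map String.toList with
        | nil => rw [mergeF_one, mergeF_nil]
        | cons u us =>
          rw [mergeF_cons₂, if_neg ?_]
          rintro ⟨hspec, hu⟩
          apply hcond
          simp only [Bool.and_eq_true, Bool.or_eq_true, beq_iff_eq]
          constructor
          · have hmh : (mergeF (ss.map String.toList)).head? = some ['='] := by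
              rw [pv_mergeF_head _ h1', hmap, hu]; rfl
            rw [← IH] at hmh
            cases hRv : R with
            | nil => rw [hRv] at hmh; simp at hmh
            | cons r0 rs =>
              rw [hRv] at hmh
              simp only [List.map_cons, List.head?_cons, Option.some.injEq] at hmh ⊢
              congr 1
              apply String.toList_inj.mp
              rw [hmh]; rfl
          · rcases hspec with h' | h' | h'
            · exact Or.inl (Or.inl (String.toList_inj.mp (by rw [h']; rfl)))
            · exact Or.inl (Or.inr (String.toList_inj.mp (by rw [h']; rfl)))
            · exact Or.inr (String.toList_inj.mp (by rw [h']; rfl))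
      rw [hstep, ← IH]

theorem pv_foldB (ss : List String) (h1 : pvF1 (ss.map String.toList))
    (h2 : pvF2 (ss.map String.toList)) :
    (ss.reverse.foldl
      (fun res t =>
        if res.head? == some "=" && (t == "<" || t == ">" || t == "!") then
          (t ++ "=") :: res.tail
        else t :: res) []).map String.toList = mergeF (ss.map String.toList) := by
  rw [List.foldl_reverse]
  exact pv_foldB_r ss h1 h2

-- ===== lifting the shared first phase to character lists =====
theorem pv_fold_toList (ops : List String) : ∀ (q : String),
    ((ops.foldl (fun q oper => if oper ∈ ["in", "between", "last"] then q
        else PySem.Str.replace q oper (" " ++ oper ++ " ")) q) : String).toList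
    = ops.foldl (fun l oper => if oper ∈ ["in", "between", "last"] then l
        else PySem.Chars.replace l oper.toList (' ' :: (oper.toList ++ [' ']))) q.toList := by
  induction ops with
  | nil => intro q; rfl
  | cons op ops ih =>
    intro q
    rw [List.foldl_cons, List.foldl_cons, ih]
    congr 1
    by_cases hop : op ∈ ["in", "between", "last"]
    · rw [if_pos hop, if_pos hop]
    · rw [if_neg hop, if_neg hop]
      rw [PySem.Str.toList_replace]
      congr 1
      rw [String.toList_append, String.toList_append]
      rw [show (" " : String).toList = [' '] from by decide]
      simp

-- strip over split₀ tokens is the identity, at the String level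
theorem pv_map_strip_id (ps : List String) (h1 : pvF1 (ps.map String.toList)) :
    ps.map PySem.Str.strip = ps := by
  apply List.map_congr_left ?_ |>.trans (List.map_id ps)
  intro s hs
  apply String.toList_inj.mp
  rw [PySem.Str.toList_strip]
  exact pv_strip_tok s.toList (h1 s.toList (List.mem_map_of_mem hs)).2

-- the four glued symbols are isolated by spaces after the first phase
theorem pv_F2_q1 (M : List Char) :
    pvF2 (PySem.Chars.split₀
      (["(", ")", ">", "<", "!", "[", "]", ",", "="].foldl
        (fun l oper => if oper ∈ ["in", "between", "last"] then l
          else PySem.Chars.replace l oper.toList (' ' :: (oper.toList ++ [' ']))) M)) := by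
  simp only [List.foldl_cons, List.foldl_nil]
  rw [if_neg (by decide), if_neg (by decide), if_neg (by decide), if_neg (by decide),
      if_neg (by decide), if_neg (by decide), if_neg (by decide), if_neg (by decide),
      if_neg (by decide)]
  rw [show ("(" : String).toList = ['('] from by decide,
      show (")" : String).toList = [')'] from by decide,
      show (">" : String).toList = ['>'] from by decide,
      show ("<" : String).toList = ['<'] from by decide,
      show ("!" : String).toList = ['!'] from by decide,
      show ("[" : String).toList = ['['] from by decide,
      show ("]" : String).toList = [']'] from by decide,
      show ("," : String).toList = [','] from by decide,
      show ("=" : String).toList = ['='] from by decide]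
  simp only [List.cons_append, List.nil_append]
  rw [pv_replace_single, pv_replace_single, pv_replace_single, pv_replace_single,
      pv_replace_single, pv_replace_single, pv_replace_single, pv_replace_single,
      pv_replace_single]
  -- name the intermediate stages
  set m0 := M.flatMap (fun x => if x = '(' then [' ', '(', ' '] else [x]) with hm0
  set m1 := m0.flatMap (fun x => if x = ')' then [' ', ')', ' '] else [x]) with hm1
  set m2 := m1.flatMap (fun x => if x = '>' then [' ', '>', ' '] else [x]) with hm2
  set m3 := m2.flatMap (fun x => if x = '<' then [' ', '<', ' '] else [x]) with hm3
  set m4 := m3.flatMap (fun x => if x = '!' then [' ', '!', ' '] else [x]) with hm4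
  set m5 := m4.flatMap (fun x => if x = '[' then [' ', '[', ' '] else [x]) with hm5
  set m6 := m5.flatMap (fun x => if x = ']' then [' ', ']', ' '] else [x]) with hm6
  set m7 := m6.flatMap (fun x => if x = ',' then [' ', ',', ' '] else [x]) with hm7
  set m8 := m7.flatMap (fun x => if x = '=' then [' ', '=', ' '] else [x]) with hm8
  have hgt : pvIsoAux '>' ' ' m8 = true := by
    rw [hm8]
    refine pv_iso_preserve '>' '=' (by decide) (by decide) (by decide) m7 ' ' ' ' (fun _ => rfl) ?_
    rw [hm7]
    refine pv_iso_preserve '>' ',' (by decide) (by decide) (by decide) m6 ' ' ' ' (fun _ => rfl) ?_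
    rw [hm6]
    refine pv_iso_preserve '>' ']' (by decide) (by decide) (by decide) m5 ' ' ' ' (fun _ => rfl) ?_
    rw [hm5]
    refine pv_iso_preserve '>' '[' (by decide) (by decide) (by decide) m4 ' ' ' ' (fun _ => rfl) ?_
    rw [hm4]
    refine pv_iso_preserve '>' '!' (by decide) (by decide) (by decide) m3 ' ' ' ' (fun _ => rfl) ?_
    rw [hm3]
    refine pv_iso_preserve '>' '<' (by decide) (by decide) (by decide) m2 ' ' ' ' (fun _ => rfl) ?_
    rw [hm2]
    exact pv_iso_establish '>' (by decide) m1 ' '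
  have hlt : pvIsoAux '<' ' ' m8 = true := by
    rw [hm8]
    refine pv_iso_preserve '<' '=' (by decide) (by decide) (by decide) m7 ' ' ' ' (fun _ => rfl) ?_
    rw [hm7]
    refine pv_iso_preserve '<' ',' (by decide) (by decide) (by decide) m6 ' ' ' ' (fun _ => rfl) ?_
    rw [hm6]
    refine pv_iso_preserve '<' ']' (by decide) (by decide) (by decide) m5 ' ' ' ' (fun _ => rfl) ?_
    rw [hm5]
    refine pv_iso_preserve '<' '[' (by decide) (by decide) (by decide) m4 ' ' ' ' (fun _ => rfl) ?_
    rw [hm4]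
    refine pv_iso_preserve '<' '!' (by decide) (by decide) (by decide) m3 ' ' ' ' (fun _ => rfl) ?_
    rw [hm3]
    exact pv_iso_establish '<' (by decide) m2 ' '
  have hbang : pvIsoAux '!' ' ' m8 = true := by
    rw [hm8]
    refine pv_iso_preserve '!' '=' (by decide) (by decide) (by decide) m7 ' ' ' ' (fun _ => rfl) ?_
    rw [hm7]
    refine pv_iso_preserve '!' ',' (by decide) (by decide) (by decide) m6 ' ' ' ' (fun _ => rfl) ?_
    rw [hm6]
    refine pv_iso_preserve '!' ']' (by decide) (by decide) (by decide) m5 ' ' ' ' (fun _ => rfl) ?_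
    rw [hm5]
    refine pv_iso_preserve '!' '[' (by decide) (by decide) (by decide) m4 ' ' ' ' (fun _ => rfl) ?_
    rw [hm4]
    exact pv_iso_establish '!' (by decide) m3 ' '
  have heq : pvIsoAux '=' ' ' m8 = true := by
    rw [hm8]
    exact pv_iso_establish '=' (by decide) m7 ' '
  intro t ht c hc hct
  rcases hc with h' | h' | h' | h' <;> subst h'
  · exact pv_iso_split0 '<' m8 hlt t ht hct
  · exact pv_iso_split0 '>' m8 hgt t ht hct
  · exact pv_iso_split0 '!' m8 hbang t ht hct
  · exact pv_iso_split0 '=' m8 heq t ht hct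

-- ===== VERDICT (by name: the statement is the Claim_ definition above) =====
theorem relax_spec : Claim_equal_relax := by
  unfold Claim_equal_relax
  intro query operators _
  unfold Spec_relax relax relax_alt
  simp only
  set q1 := (operators ++ ["(", ")", ">", "<", "!", "[", "]", ",", "="]).foldl
    (fun q oper => if oper ∈ ["in", "between", "last"] then q
                   else PySem.Str.replace q oper (" " ++ oper ++ " ")) query with hq1
  set ts := PySem.Chars.split₀ q1.toList with hts
  have hF1 : pvF1 ts := pv_split0_F1 q1.toList
  have hF2 : pvF2 ts := by
    rw [hts, hq1, pv_fold_toList, List.foldl_append]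
    exact pv_F2_q1 _
  have htsmap : (PySem.Str.split₀ q1).map String.toList = ts := by
    rw [hts]; exact PySem.Str.split₀_map_toList q1
  have hstrip1 : (PySem.Str.split₀ q1).map PySem.Str.strip = PySem.Str.split₀ q1 :=
    pv_map_strip_id _ (by rw [htsmap]; exact hF1)
  rw [hstrip1]
  have hq2 : (PySem.Str.join " " (PySem.Str.split₀ q1)).toList = PySem.Chars.join [' '] ts := by
    rw [PySem.Str.toList_join, htsmap, show (" " : String).toList = [' '] from by decide]
  have hout : (String.ofList
      (relaxGoA (PySem.Str.join " " (PySem.Str.split₀ q1)).toList [])).toList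
      = relaxGoA (PySem.Chars.join [' '] ts) [] := by
    rw [String.toList_ofList, hq2]
  have houtmap : (PySem.Str.split₀ (String.ofList
      (relaxGoA (PySem.Str.join " " (PySem.Str.split₀ q1)).toList []))).map String.toList
      = mergeF ts := by
    rw [PySem.Str.split₀_map_toList, hout]
    exact pv_splitA ts.length ts le_rfl hF1 hF2
  have hF1m : pvF1 (mergeF ts) := pv_mergeF_F1 ts.length ts le_rfl hF1
  have hstrip2 : (PySem.Str.split₀ (String.ofList
      (relaxGoA (PySem.Str.join " " (PySem.Str.split₀ q1)).toList []))).map PySem.Str.strip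
      = PySem.Str.split₀ (String.ofList
      (relaxGoA (PySem.Str.join " " (PySem.Str.split₀ q1)).toList [])) :=
    pv_map_strip_id _ (by rw [houtmap]; exact hF1m)
  rw [hstrip2]
  have hres : ((PySem.Str.split₀ q1).reverse.foldl
      (fun res t =>
        if res.head? == some "=" && (t == "<" || t == ">" || t == "!") then
          (t ++ "=") :: res.tail
        else t :: res) []).map String.toList = mergeF ts := by
    rw [pv_foldB (PySem.Str.split₀ q1) (by rw [htsmap]; exact hF1) (by rw [htsmap]; exact hF2)]
    rw [htsmap]
  congr 1
  have hinj : Function.Injective String.toList := fun a b h => String.toList_inj.mp h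
  exact List.map_injective_iff.mpr hinj (by rw [houtmap, hres])
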